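-- pv_equiv track=rewrite | github.com/Bahuncoder/dharmamindv3 | dharmallm/engines/rishi_emotional_integration.py | _prioritize_practices
-- ===== SOURCE A (Python) =====
-- from typing import Dict, Optional, List
--
-- def _prioritize_practices(
--
--     practices: List[str],
--     preferences: List[str]
-- ) -> List[str]:
--     """
--     Reorder practices to match Rishi's preferences.
--
--     Args:
--         practices: All available practices
--         preferences: Rishi's preferred practice types
--
--     Returns:
--         Reordered practice list
--     """
--     # Practices matching preferences come first
--     matched = []
--     unmatched = []
--
--     for practice in practices:
--         practice_lower = practice.lower()
--         if any(pref.lower() in practice_lower for pref in preferences):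
--             matched.append(practice)
--         else:
--             unmatched.append(practice)
--
--     return matched + unmatched
-- ===== SOURCE B (Python) =====
-- def _prioritize_practices(practices, preferences):
--     prefs = [pref.lower() for pref in preferences]
--     return sorted(practices,
--                   key=lambda practice: not any(pref in practice.lower() for pref in prefs))
-- ===== Notes on version B (the rewrite author's own statement) =====
-- stated objective: idiomatic
-- what changed: Replaces the two-accumulator partition-and-concatenate loop with a single stable sort keyed by 'does not match a preference', relying on sort stability to keep matched elements first in original order.
import Mathlib
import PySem

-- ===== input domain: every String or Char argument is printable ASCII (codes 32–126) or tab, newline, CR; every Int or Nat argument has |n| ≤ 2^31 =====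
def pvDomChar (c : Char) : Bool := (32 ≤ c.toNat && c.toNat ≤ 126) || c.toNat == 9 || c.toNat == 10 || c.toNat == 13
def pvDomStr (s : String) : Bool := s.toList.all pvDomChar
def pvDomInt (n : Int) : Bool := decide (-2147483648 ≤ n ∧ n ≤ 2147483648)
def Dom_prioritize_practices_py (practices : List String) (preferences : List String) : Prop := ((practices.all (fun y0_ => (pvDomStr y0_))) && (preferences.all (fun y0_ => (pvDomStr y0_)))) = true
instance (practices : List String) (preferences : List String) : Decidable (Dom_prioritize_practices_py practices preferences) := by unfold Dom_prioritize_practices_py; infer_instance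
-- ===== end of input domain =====

-- B replaces A's partition-and-concatenate loop with a single stable sort keyed by
-- "does not match a preference" (idiomatic; same asymptotic cost, not claimed faster).

-- ===== PORT A =====
-- two-accumulator partition loop, then matched ++ unmatched
def prioritize_practices_py (practices : List String) (preferences : List String) : List String :=
  let r := practices.foldl
    (fun (st : List String × List String) practice =>
      let practice_lower := PySem.Str.lower practice
      if preferences.any (fun pref => PySem.Str.isIn (PySem.Str.lower pref) practice_lower)
      then (st.1 ++ [practice], st.2)
      else (st.1, st.2 ++ [practice]))
    ([], [])
  r.1 ++ r.2

-- ===== PORT B =====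
-- stable sort by Boolean key: not (any lowered preference occurs in the lowered practice)
def prioritize_practices_py_alt (practices : List String) (preferences : List String) : List String :=
  let prefs := preferences.map PySem.Str.lower
  PySem.List.sorted practices
    (fun practice => !(prefs.any (fun pref => PySem.Str.isIn pref (PySem.Str.lower practice))))
    false

-- ===== PRECONDITION & SPEC =====
def Spec_prioritize_practices_py (practices : List String) (preferences : List String) (out : List String) : Prop := out = prioritize_practices_py_alt practices preferences
instance (practices : List String) (preferences : List String) (out : List String) : Decidable (Spec_prioritize_practices_py practices preferences out) := by unfold Spec_prioritize_practices_py; infer_instance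

-- ===== CLAIM (what is proved, stated in full; the proofs are below) =====
def Claim_equal_prioritize_practices_py : Prop := ∀ (practices : List String) (preferences : List String), Dom_prioritize_practices_py practices preferences → Spec_prioritize_practices_py practices preferences (prioritize_practices_py practices preferences)

-- ===== LEMMAS AND PROOFS =====

-- Inserting x into a list of the shape F ++ T (all keys false in F, all true in T)
-- with the Bool-key "before" predicate lands x at the end of its own group (stability).
theorem insertBy_false {α : Type} (key : α → Bool) (x : α) (F T : List α)
    (hF : ∀ a ∈ F, key a = false) (hT : ∀ a ∈ T, key a = true) (hx : key x = false) :
    PySem.List.insertBy (fun a b => decide (key a < key b)) x (F ++ T)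
      = (F ++ [x]) ++ T := by
  induction F with
  | nil =>
    cases T with
    | nil => simp [PySem.List.insertBy]
    | cons y ys =>
      have hy : key y = true := hT y (by simp)
      simp [PySem.List.insertBy, hx, hy, Bool.lt_iff]
  | cons f fs ih =>
    have hf : key f = false := hF f (by simp)
    have := ih (fun a ha => hF a (by simp [ha]))
    simp [PySem.List.insertBy, hx, hf, Bool.lt_iff] at this ⊢
    simpa using this

theorem insertBy_true {α : Type} (key : α → Bool) (x : α) (F T : List α)
    (hF : ∀ a ∈ F, key a = false) (hT : ∀ a ∈ T, key a = true) (hx : key x = true) :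
    PySem.List.insertBy (fun a b => decide (key a < key b)) x (F ++ T)
      = F ++ (T ++ [x]) := by
  induction F with
  | nil =>
    induction T with
    | nil => simp [PySem.List.insertBy]
    | cons y ys ihT =>
      have hy : key y = true := hT y (by simp)
      have := ihT (fun a ha => hT a (by simp [ha]))
      simp [PySem.List.insertBy, hx, hy, Bool.lt_iff] at this ⊢
      simpa using this
  | cons f fs ih =>
    have hf : key f = false := hF f (by simp)
    have := ih (fun a ha => hF a (by simp [ha]))
    simp [PySem.List.insertBy, hx, hf, Bool.lt_iff] at this ⊢
    simpa using this

-- The insertion-sort fold over a Bool key, started from F ++ T, partitions stably.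
theorem sorted_fold_partition {α : Type} (key : α → Bool) (xs F T : List α)
    (hF : ∀ a ∈ F, key a = false) (hT : ∀ a ∈ T, key a = true) :
    xs.foldl (fun acc x => PySem.List.insertBy (fun a b => decide (key a < key b)) x acc) (F ++ T)
      = (F ++ xs.filter (fun x => key x = false)) ++ (T ++ xs.filter (fun x => key x = true)) := by
  induction xs generalizing F T with
  | nil => simp
  | cons x xs ih =>
    cases hx : key x with
    | false =>
      have hF' : ∀ a ∈ F ++ [x], key a = false := by
        intro a ha
        rcases List.mem_append.1 ha with h | h
        · exact hF a h
        · simp at h; simpa [h] using hx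
      rw [List.foldl_cons, insertBy_false key x F T hF hT hx, ih (F ++ [x]) T hF' hT]
      simp [hx]
    | true =>
      have hT' : ∀ a ∈ T ++ [x], key a = true := by
        intro a ha
        rcases List.mem_append.1 ha with h | h
        · exact hT a h
        · simp at h; simpa [h] using hx
      rw [List.foldl_cons, insertBy_true key x F T hF hT hx, ih F (T ++ [x]) hF hT']
      simp [hx]

-- A's two-accumulator fold computes the two filters appended to the starting state.
theorem partition_fold (p : String → Bool) (xs : List String) (F T : List String) :
    xs.foldl (fun (st : List String × List String) x =>
        if p x then (st.1 ++ [x], st.2) else (st.1, st.2 ++ [x])) (F, T)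
      = (F ++ xs.filter p, T ++ xs.filter (fun x => !p x)) := by
  induction xs generalizing F T with
  | nil => simp
  | cons x xs ih =>
    cases hx : p x with
    | false => simp [hx, ih]
    | true => simp [hx, ih]

-- The two programs, abstracted over the per-element predicate p and B's key k = !p.
theorem partition_eq_insertion_fold (p k : String → Bool) (hk : ∀ x, k x = !(p x))
    (xs : List String) :
    (xs.foldl (fun (st : List String × List String) x =>
        if p x then (st.1 ++ [x], st.2) else (st.1, st.2 ++ [x])) ([], [])).1 ++
      (xs.foldl (fun (st : List String × List String) x =>
        if p x then (st.1 ++ [x], st.2) else (st.1, st.2 ++ [x])) ([], [])).2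
      = xs.foldl (fun acc x => PySem.List.insertBy (fun a b => decide (k a < k b)) x acc) [] := by
  have hbefore : (fun a b => decide (k a < k b))
      = fun a b => decide ((fun x => !(p x)) a < (fun x => !(p x)) b) := by
    funext a b; rw [hk, hk]
  have hs := sorted_fold_partition (fun x => !(p x)) xs [] [] (by simp) (by simp)
  simp only [List.nil_append] at hs
  rw [hbefore, partition_fold p xs [] [], hs]
  simp

-- ===== VERDICT (by name: the statement is the Claim_ definition above) =====
theorem prioritize_practices_py_spec : Claim_equal_prioritize_practices_py := by
  intro practices preferences _
  unfold Spec_prioritize_practices_py prioritize_practices_py prioritize_practices_py_alt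
  exact partition_eq_insertion_fold
    (fun practice => preferences.any
      (fun pref => PySem.Str.isIn (PySem.Str.lower pref) (PySem.Str.lower practice)))
    (fun practice => !((preferences.map PySem.Str.lower).any
      (fun pref => PySem.Str.isIn pref (PySem.Str.lower practice))))
    (by intro x; simp [List.any_map, Function.comp_def]) practices
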